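-- pv_equiv track=rewrite | github.com/anhthungn/semin-IKT | kasiopea/B-knizky/knizky.py | minimal_steps
-- ===== SOURCE A (Python) =====
-- def minimal_steps(N, shelf):
--     # find all the positions of 'K' on the shelf
--     positions = [i for i, char in enumerate(shelf) if char == 'K']
--
--     # find the median
--     median_index = len(positions) // 2
--     median_position = positions[median_index]
--
--     # calculate the minimal number of steps to move the books together
--     steps = 0
--     for i, pos in enumerate(positions):
--         steps += abs(pos - (median_position - median_index + i))
--
--     return steps
-- ===== SOURCE B (Python) =====
-- def minimal_steps(N, shelf):
--     # Gather cost by gaps: each run of non-'K' cells strictly between two 'K's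
--     # must be crossed by every book on its smaller side, so it contributes
--     # (gap length) * min(#K left of it, #K right of it).  Single pass, no median.
--     total = 0
--     for ch in shelf:
--         if ch == 'K':
--             total += 1
--     steps = 0
--     seen = 0
--     last = None
--     for i, ch in enumerate(shelf):
--         if ch == 'K':
--             if last is not None:
--                 steps += (i - last - 1) * min(seen, total - seen)
--             seen += 1
--             last = i
--     return steps
-- ===== Notes on version B (the rewrite author's own statement) =====
-- stated objective: alternative
-- what changed: B never builds the positions list or a median: it counts the K's, then in one pass over the shelf charges every run of non-K cells between two K's with (run length) * min(#K left, #K right); Pre_ excludes exactly the shelves with no 'K', on which A raises IndexError and B returns 0.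
import Mathlib
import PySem

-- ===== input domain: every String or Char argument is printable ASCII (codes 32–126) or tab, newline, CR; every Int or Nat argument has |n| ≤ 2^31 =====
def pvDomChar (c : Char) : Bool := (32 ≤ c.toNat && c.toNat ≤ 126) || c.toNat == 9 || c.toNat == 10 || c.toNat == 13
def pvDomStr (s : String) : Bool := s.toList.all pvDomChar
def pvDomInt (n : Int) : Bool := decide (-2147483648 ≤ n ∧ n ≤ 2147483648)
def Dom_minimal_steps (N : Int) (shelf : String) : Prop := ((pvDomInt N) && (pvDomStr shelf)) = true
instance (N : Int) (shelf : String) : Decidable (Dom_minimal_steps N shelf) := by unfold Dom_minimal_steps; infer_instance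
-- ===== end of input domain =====

-- B replaces A's median-and-absolute-distances computation by a counting pass over the
-- shelf: each run of non-'K' cells between two 'K's contributes
-- (run length) * min(#K to its left, #K to its right); no positions list, no median
-- ("alternative" objective, same O(n) cost).

-- ===== PORT A =====
def minimal_steps (N : Int) (shelf : String) : Int :=
  let positions : List Int :=
    ((PySem.List.enumerate shelf.toList 0).filter (fun p => p.2 == 'K')).map (fun p => p.1)
  let median_index : Nat := positions.length / 2
  -- positions[median_index]: IndexError when positions = [] (excluded by Pre_)
  let median_position : Int := PySem.List.pyGetD positions (median_index : Int) 0
  (PySem.List.enumerate positions 0).foldl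
    (fun steps ip => steps + |ip.2 - (median_position - (median_index : Int) + ip.1)|) 0

-- ===== PORT B =====
def minimal_steps_alt (N : Int) (shelf : String) : Int :=
  let total : Int :=
    shelf.toList.foldl (fun acc ch => if ch == 'K' then acc + 1 else acc) 0
  let st : Int × Int × Option Int :=
    (PySem.List.enumerate shelf.toList 0).foldl
      (fun st ic =>
        if ic.2 == 'K' then
          ((match st.2.2 with
            | some last => st.1 + (ic.1 - last - 1) * min st.2.1 (total - st.2.1)
            | none => st.1), st.2.1 + 1, some ic.1)
        else st)
      (0, 0, none)
  st.1

-- ===== PRECONDITION & SPEC =====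
-- Pre_ excludes exactly the shelves with no 'K', on which A raises IndexError.
def Pre_minimal_steps (N : Int) (shelf : String) : Prop := 'K' ∈ shelf.toList
instance (N : Int) (shelf : String) : Decidable (Pre_minimal_steps N shelf) := by
  unfold Pre_minimal_steps; infer_instance

def pvWitness_minimal_steps : Int × String := (4, ".KK.")

def Spec_minimal_steps (N : Int) (shelf : String) (out : Int) : Prop := out = minimal_steps_alt N shelf
instance (N : Int) (shelf : String) (out : Int) : Decidable (Spec_minimal_steps N shelf out) := by unfold Spec_minimal_steps; infer_instance

-- ===== CLAIM (what is proved, stated in full; the proofs are below) =====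
def Claim_equal_minimal_steps : Prop := ∀ (N : Int) (shelf : String), Dom_minimal_steps N shelf → Pre_minimal_steps N shelf → Spec_minimal_steps N shelf (minimal_steps N shelf)

-- ===== LEMMAS AND PROOFS =====

-- A's positions list, as a function of the enumerated shelf
def posList (l : List (Int × Char)) : List Int :=
  (l.filter (fun p => p.2 == 'K')).map (fun p => p.1)

-- the offsets d[j] = ps[j] - (s + j)
def offs (ps : List Int) (s : Int) : List Int :=
  (PySem.List.enumerate ps s).map (fun q => q.2 - q.1)

-- B's contribution of the gaps of prev :: l, prev being the j-th 'K' of m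
def gpairs (m j prev : Int) : List Int → Int
  | [] => 0
  | p :: rest => (p - prev - 1) * min j (m - j) + gpairs m (j + 1) p rest

-- the gap sum of a list d: Σ (d[i+1]-d[i]) * min(i+1, |d|-1-i)
def wsum (d : List Int) : Int :=
  ∑ i ∈ Finset.range (d.length - 1),
    (d.getD (i + 1) 0 - d.getD i 0) * min ((i : Int) + 1) ((d.length : Int) - 1 - i)

lemma offs_nil (s : Int) : offs [] s = [] := rfl

lemma offs_cons (p : Int) (ps : List Int) (s : Int) :
    offs (p :: ps) s = (p - s) :: offs ps (s + 1) := by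
  simp [offs, PySem.List.enumerate_cons]

lemma length_offs (ps : List Int) (s : Int) : (offs ps s).length = ps.length := by
  simp [offs, PySem.List.length_enumerate]

-- getD of offs in terms of getD of ps
lemma offs_getD (ps : List Int) (k : Nat) (hk : k < ps.length) :
    (offs ps 0).getD k 0 = ps.getD k 0 - (k : Int) := by
  have hk' : k < (offs ps 0).length := by rw [length_offs]; exact hk
  have h1 : (offs ps 0)[k] = ps[k] - (k : Int) := by
    simp [offs, PySem.List.getElem_enumerate]
  rw [List.getD_eq_getElem?_getD, List.getElem?_eq_getElem hk', h1]
  rw [List.getD_eq_getElem?_getD, List.getElem?_eq_getElem hk]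
  rfl

-- bound used for sortedness of the offsets
lemma headBound (ps : List Int) :
    ∀ (s p : Int), ps.Pairwise (· < ·) → (∀ x ∈ ps, p < x) →
      ∀ q ∈ PySem.List.enumerate ps (s + 1), p - s ≤ q.2 - q.1 := by
  induction ps with
  | nil => intro s p _ _ q hq; simp [PySem.List.enumerate_nil] at hq
  | cons a ps ih =>
    intro s p hpw hlt q hq
    rw [PySem.List.enumerate_cons] at hq
    rcases List.mem_cons.mp hq with hq | hq
    · subst hq; have := hlt a (by simp); simp; omega
    · have h1 : a - (s + 1) ≤ q.2 - q.1 := by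
        exact ih (s + 1) a (hpw.of_cons) (by
          intro x hx; exact List.rel_of_pairwise_cons hpw hx) q hq
      have h2 : p < a := hlt a (by simp)
      omega

-- the offsets of a strictly increasing list are sorted (non-decreasing)
lemma offs_pairwise (ps : List Int) :
    ∀ s : Int, ps.Pairwise (· < ·) → (offs ps s).Pairwise (· ≤ ·) := by
  induction ps with
  | nil => intro s _; simp [offs_nil]
  | cons a ps ih =>
    intro s hpw
    rw [offs_cons]
    refine List.pairwise_cons.mpr ⟨?_, ih (s + 1) hpw.of_cons⟩
    intro x hx
    rcases List.mem_map.mp hx with ⟨q, hq, rfl⟩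
    exact headBound ps s a hpw.of_cons
      (fun y hy => List.rel_of_pairwise_cons hpw hy) q hq

-- A's positions are strictly increasing
lemma posList_pairwise (cs : List Char) :
    (posList (PySem.List.enumerate cs 0)).Pairwise (· < ·) := by
  apply List.pairwise_map.mpr
  exact (PySem.List.pairwise_lt_enumerate cs 0).filter _

-- key lemma 1: for a sorted non-empty list, the sum of |x - median| equals
-- (sum of top half) - (sum of bottom half)
lemma median_split : ∀ (n : Nat) (d : List Int), d.length ≤ n →
    d.Pairwise (· ≤ ·) → d ≠ [] →
    (d.map (fun x => |x - d.getD (d.length / 2) 0|)).sum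
      = (d.drop (d.length - d.length / 2)).sum - (d.take (d.length / 2)).sum := by
  intro n
  induction n using Nat.strong_induction_on with
  | _ n ih =>
    intro d hlen hpw hne
    match d, hlen, hpw, hne with
    | [a], _, _, _ => simp
    | a :: b :: t, hlen, hpw, hne =>
      have hune : (b :: t) ≠ [] := by simp
      have hsplit : b :: t = (b :: t).dropLast ++ [(b :: t).getLast hune] :=
        (List.dropLast_append_getLast hune).symm
      set mid := (b :: t).dropLast with hmiddef
      set c := (b :: t).getLast hune with hcdef
      set k := mid.length with hkdef
      have hulen : (b :: t).length = k + 1 := by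
        rw [hsplit, List.length_append, List.length_singleton]
      have ha : ∀ x ∈ b :: t, a ≤ x := fun x hx => List.rel_of_pairwise_cons hpw hx
      have hpwu : (b :: t).Pairwise (· ≤ ·) := hpw.of_cons
      have hpwmid : mid.Pairwise (· ≤ ·) := by
        rw [hsplit] at hpwu; exact (List.pairwise_append.mp hpwu).1
      have hmc : ∀ x ∈ mid, x ≤ c := by
        rw [hsplit] at hpwu
        intro x hx
        exact (List.pairwise_append.mp hpwu).2.2 x hx c (by simp)
      have hlen2 : (a :: b :: t).length = k + 2 := by rw [List.length_cons, hulen]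
      have hhalf : (a :: b :: t).length / 2 = k / 2 + 1 := by rw [hlen2]; omega
      have hgetD : (a :: b :: t).getD ((a :: b :: t).length / 2) 0
          = (b :: t).getD (k / 2) 0 := by rw [hhalf]; rfl
      set m := (b :: t).getD (k / 2) 0 with hmdef
      have hkhalf : k / 2 < k + 1 := by omega
      have hmidx : (b :: t)[k / 2]'(by omega) = m := by
        rw [hmdef, List.getD_eq_getElem?_getD, List.getElem?_eq_getElem (by omega : k / 2 < (b :: t).length)]
        rfl
      have hmem : m ∈ b :: t := by rw [← hmidx]; exact List.getElem_mem _
      have ham : a ≤ m := ha m hmem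
      have hmcle : m ≤ c := by
        rw [hsplit] at hmem
        rcases List.mem_append.mp hmem with h | h
        · exact hmc m h
        · simp at h; omega
      have habsa : |a - m| = m - a := by rw [abs_sub_comm]; exact abs_of_nonneg (by omega)
      have habsc : |c - m| = c - m := abs_of_nonneg (by omega)
      by_cases hmidnil : mid = []
      · have hbt : b :: t = [c] := by rw [hsplit, hmidnil]; rfl
        rw [hgetD]
        rw [show (a :: b :: t) = [a, c] by rw [hbt]]
        have hk0 : k = 0 := by rw [hkdef, hmidnil]; rfl
        have hm2 : m = c := by rw [hmdef, hbt, hk0]; rfl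
        simp [hm2, hm2 ▸ habsa]
      · have hkpos : 1 ≤ k := by
          rw [hkdef]; exact List.length_pos_of_ne_nil hmidnil
        have hmmid : mid.getD (k / 2) 0 = m := by
          rw [hmdef, hsplit, List.getD_eq_getElem?_getD, List.getD_eq_getElem?_getD,
            List.getElem?_append_left (by omega : k / 2 < mid.length)]
        have hih := ih k (by omega) mid (le_of_eq hkdef.symm) hpwmid hmidnil
        rw [← hkdef] at hih
        rw [hmmid] at hih
        rw [hgetD, show (a :: b :: t) = a :: (mid ++ [c]) by rw [← hsplit]]
        have hlen3 : (a :: (mid ++ [c])).length = k + 2 := by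
          simp [hkdef]
        rw [hlen3]
        have h1 : (k + 2) / 2 = k / 2 + 1 := by omega
        have h2 : k + 2 - (k + 2) / 2 = (k - k / 2) + 1 := by omega
        rw [h2, h1]
        have htake : (a :: (mid ++ [c])).take (k / 2 + 1) = a :: mid.take (k / 2) := by
          rw [List.take_cons, Nat.add_sub_cancel,
            List.take_append_of_le_length (by omega : k / 2 ≤ mid.length)]
          omega
        have hdrop : (a :: (mid ++ [c])).drop ((k - k / 2) + 1)
            = mid.drop (k - k / 2) ++ [c] := by
          rw [List.drop_succ_cons, List.drop_append_of_le_length (by omega : k - k / 2 ≤ mid.length)]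
        rw [htake, hdrop]
        simp only [List.map_cons, List.map_append, List.sum_cons, List.sum_append,
          List.map_nil, List.sum_nil]
        rw [habsa, habsc]
        linarith [hih]

-- peel lemma for the gap sum
lemma wsum_peel (a c : Int) (mid : List Int) :
    wsum (a :: (mid ++ [c])) = (c - a) + wsum mid := by
  cases mid with
  | nil => simp [wsum]
  | cons b mt =>
    have hget : ∀ i : Nat, i < mt.length + 1 →
        (a :: ((b :: mt) ++ [c])).getD (i + 1) 0 = (b :: mt).getD i 0 := by
      intro i hi
      rw [List.getD_cons_succ, List.getD_append _ _ _ i (by simpa using hi)]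
    have hgetc : (a :: ((b :: mt) ++ [c])).getD (mt.length + 2) 0 = c := by
      rw [List.getD_cons_succ, List.getD_eq_getElem?_getD,
        List.getElem?_append_right (by simp)]
      simp
    simp only [wsum, List.length_cons, List.length_append, List.length_nil,
      Nat.add_sub_cancel]
    rw [Finset.sum_range_succ, Finset.sum_range_succ']
    have hmid : ∀ i ∈ Finset.range mt.length,
        ((a :: (b :: mt ++ [c])).getD (i + 1 + 1) 0 - (a :: (b :: mt ++ [c])).getD (i + 1) 0)
            * min (((i + 1 : Nat) : Int) + 1) (((mt.length + 1 + 1 + 1 : Nat) : Int) - 1 - ((i + 1 : Nat) : Int))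
        = ((b :: mt).getD (i + 1) 0 - (b :: mt).getD i 0)
            + ((b :: mt).getD (i + 1) 0 - (b :: mt).getD i 0)
              * min ((i : Int) + 1) (((mt.length + 1 : Nat) : Int) - 1 - (i : Int)) := by
      intro i hi
      rw [Finset.mem_range] at hi
      rw [hget (i + 1) (by omega), hget i (by omega)]
      have hm : min (((i + 1 : Nat) : Int) + 1) (((mt.length + 1 + 1 + 1 : Nat) : Int) - 1 - ((i + 1 : Nat) : Int))
          = 1 + min ((i : Int) + 1) (((mt.length + 1 : Nat) : Int) - 1 - (i : Int)) := by
        push_cast; omega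
      rw [hm]; ring
    rw [Finset.sum_congr rfl hmid, Finset.sum_add_distrib,
      Finset.sum_range_sub (fun i => (b :: mt).getD i 0)]
    have hF0 : ((a :: (b :: mt ++ [c])).getD (0 + 1) 0 - (a :: (b :: mt ++ [c])).getD 0 0)
        * min (((0 : Nat) : Int) + 1) (((mt.length + 1 + 1 + 1 : Nat) : Int) - 1 - ((0 : Nat) : Int))
        = b - a := by
      rw [hget 0 (by omega)]
      have hm : min (((0 : Nat) : Int) + 1) (((mt.length + 1 + 1 + 1 : Nat) : Int) - 1 - ((0 : Nat) : Int)) = 1 := by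
        push_cast; omega
      rw [hm]; simp [List.getD]
    have hFl : ((a :: (b :: mt ++ [c])).getD (mt.length + 1 + 1) 0 - (a :: (b :: mt ++ [c])).getD (mt.length + 1) 0)
        * min (((mt.length + 1 : Nat) : Int) + 1) (((mt.length + 1 + 1 + 1 : Nat) : Int) - 1 - ((mt.length + 1 : Nat) : Int))
        = c - (b :: mt).getD mt.length 0 := by
      rw [show mt.length + 1 + 1 = mt.length + 2 from rfl, hgetc, hget mt.length (by omega)]
      have hm : min (((mt.length + 1 : Nat) : Int) + 1) (((mt.length + 1 + 1 + 1 : Nat) : Int) - 1 - ((mt.length + 1 : Nat) : Int)) = 1 := by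
        push_cast; omega
      rw [hm]; ring
    rw [hF0, hFl]
    simp [List.getD]
    ring

-- key lemma 2 (pure algebra, no sortedness): top half minus bottom half = gap sum
lemma dropTake_eq_wsum : ∀ (n : Nat) (d : List Int), d.length ≤ n →
    (d.drop (d.length - d.length / 2)).sum - (d.take (d.length / 2)).sum = wsum d := by
  intro n
  induction n using Nat.strong_induction_on with
  | _ n ih =>
    intro d hlen
    match d, hlen with
    | [], _ => simp [wsum]
    | [a], _ => simp [wsum]
    | a :: b :: t, hlen =>
      have hune : (b :: t) ≠ [] := by simp
      have hsplit : b :: t = (b :: t).dropLast ++ [(b :: t).getLast hune] :=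
        (List.dropLast_append_getLast hune).symm
      set mid := (b :: t).dropLast with hmiddef
      set c := (b :: t).getLast hune with hcdef
      set k := mid.length with hkdef
      have hulen : (b :: t).length = k + 1 := by
        rw [hsplit, List.length_append, List.length_singleton]
      have hlen2 : (a :: b :: t).length = k + 2 := by rw [List.length_cons, hulen]
      have hklen : k + 2 ≤ n := by rw [← hlen2]; exact hlen
      have hih := ih k (by omega) mid (le_of_eq hkdef.symm)
      rw [← hkdef] at hih
      have hpeel := wsum_peel a c mid
      rw [show (a :: b :: t) = a :: (mid ++ [c]) by rw [← hsplit]]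
      have hlen3 : (a :: (mid ++ [c])).length = k + 2 := by simp [hkdef]
      rw [hlen3]
      have h1 : (k + 2) / 2 = k / 2 + 1 := by omega
      have h2 : k + 2 - (k + 2) / 2 = (k - k / 2) + 1 := by omega
      rw [h2, h1]
      have htake : (a :: (mid ++ [c])).take (k / 2 + 1) = a :: mid.take (k / 2) := by
        rw [List.take_cons, Nat.add_sub_cancel,
          List.take_append_of_le_length (by omega : k / 2 ≤ mid.length)]
        omega
      have hdrop : (a :: (mid ++ [c])).drop ((k - k / 2) + 1)
          = mid.drop (k - k / 2) ++ [c] := by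
        rw [List.drop_succ_cons, List.drop_append_of_le_length (by omega : k - k / 2 ≤ mid.length)]
      rw [htake, hdrop, hpeel]
      simp only [List.sum_cons, List.sum_append, List.sum_nil]
      linarith [hih]

-- B's fold over the positions equals gpairs
lemma fold_gpairs (total : Int) :
    ∀ (l : List Int) (s j prev : Int),
      (l.foldl
        (fun (st : Int × Int × Option Int) p =>
          ((match st.2.2 with
            | some last => st.1 + (p - last - 1) * min st.2.1 (total - st.2.1)
            | none => st.1), st.2.1 + 1, some p))
        (s, j, some prev)).1 = s + gpairs total j prev l := by
  intro l
  induction l with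
  | nil => intro s j prev; simp [gpairs]
  | cons p rest ih =>
    intro s j prev
    simp only [List.foldl_cons, gpairs]
    rw [ih]
    ring

-- B's fold started before the first 'K'
lemma fold_gpairs0 (total : Int) (p : Int) (rest : List Int) :
    ((p :: rest).foldl
      (fun (st : Int × Int × Option Int) p =>
        ((match st.2.2 with
          | some last => st.1 + (p - last - 1) * min st.2.1 (total - st.2.1)
          | none => st.1), st.2.1 + 1, some p))
      (0, 0, none)).1 = gpairs total 1 p rest := by
  rw [List.foldl_cons]
  exact (fold_gpairs total rest 0 1 p).trans (zero_add _)

-- gpairs as an indexed sum over the gaps of prev :: l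
lemma gpairs_eq_sum (m : Int) :
    ∀ (l : List Int) (j prev : Int),
      gpairs m j prev l
        = ∑ t ∈ Finset.range l.length,
            ((prev :: l).getD (t + 1) 0 - (prev :: l).getD t 0 - 1)
              * min (j + (t : Int)) (m - (j + t)) := by
  intro l
  induction l with
  | nil => intro j prev; simp [gpairs]
  | cons p rest ih =>
    intro j prev
    simp only [gpairs, List.length_cons]
    rw [Finset.sum_range_succ', ih (j + 1) p]
    have hterm : ∀ t ∈ Finset.range rest.length,
        ((prev :: p :: rest).getD (t + 1 + 1) 0 - (prev :: p :: rest).getD (t + 1) 0 - 1)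
            * min (j + ((t + 1 : Nat) : Int)) (m - (j + ((t + 1 : Nat) : Int)))
        = ((p :: rest).getD (t + 1) 0 - (p :: rest).getD t 0 - 1)
            * min ((j + 1) + (t : Int)) (m - ((j + 1) + (t : Int))) := by
      intro t _
      simp only [List.getD_cons_succ]
      push_cast
      have e1 : j + ((t : Int) + 1) = j + 1 + t := by ring
      rw [e1]
    rw [Finset.sum_congr rfl hterm]
    simp [List.getD]
    ring

-- the count of 'K' pairs through enumerate
lemma countP_enumerate (cs : List Char) :
    ∀ s : Int, (PySem.List.enumerate cs s).countP (fun ic => ic.2 == 'K')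
      = cs.countP (fun c => c == 'K') := by
  induction cs with
  | nil => intro s; simp [PySem.List.enumerate_nil]
  | cons c cs ih => intro s; simp [PySem.List.enumerate_cons, List.countP_cons, ih]

-- length of A's positions list = number of 'K's
lemma posList_length (cs : List Char) :
    (posList (PySem.List.enumerate cs 0)).length = cs.count 'K' := by
  rw [posList, List.length_map, ← List.countP_eq_length_filter, countP_enumerate cs 0,
    List.count_eq_countP]

-- B rewritten as the gap sum of the offsets of A's positions
lemma B_eq (N : Int) (shelf : String)
    (hne : posList (PySem.List.enumerate shelf.toList 0) ≠ []) :
    minimal_steps_alt N shelf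
      = wsum (offs (posList (PySem.List.enumerate shelf.toList 0)) 0) := by
  obtain ⟨p, rest, hps⟩ : ∃ p rest,
      posList (PySem.List.enumerate shelf.toList 0) = p :: rest := by
    cases h : posList (PySem.List.enumerate shelf.toList 0) with
    | nil => exact absurd h hne
    | cons p rest => exact ⟨p, rest, rfl⟩
  have htot : shelf.toList.foldl (fun acc ch => if ch == 'K' then acc + 1 else acc) 0
      = ((posList (PySem.List.enumerate shelf.toList 0)).length : Int) := by
    rw [PySem.List.foldl_beq_add_one, posList_length, zero_add]
  simp only [minimal_steps_alt]
  rw [htot]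
  set m : Int := ((posList (PySem.List.enumerate shelf.toList 0)).length : Int) with hm
  rw [← List.foldl_filter
    (p := fun ic : Int × Char => ic.2 == 'K')
    (f := fun (st : Int × Int × Option Int) ic =>
      ((match st.2.2 with
        | some last => st.1 + (ic.1 - last - 1) * min st.2.1 (m - st.2.1)
        | none => st.1), st.2.1 + 1, some ic.1))]
  have hmap : ((PySem.List.enumerate shelf.toList 0).filter
      (fun ic : Int × Char => ic.2 == 'K')).foldl
      (fun (st : Int × Int × Option Int) ic =>
        ((match st.2.2 with
          | some last => st.1 + (ic.1 - last - 1) * min st.2.1 (m - st.2.1)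
          | none => st.1), st.2.1 + 1, some ic.1)) (0, 0, none)
      = (posList (PySem.List.enumerate shelf.toList 0)).foldl
        (fun (st : Int × Int × Option Int) p =>
          ((match st.2.2 with
            | some last => st.1 + (p - last - 1) * min st.2.1 (m - st.2.1)
            | none => st.1), st.2.1 + 1, some p)) (0, 0, none) := by
    rw [posList, List.foldl_map]
  rw [hmap, hps, fold_gpairs0 m p rest, gpairs_eq_sum]
  -- convert the indexed sum to wsum of the offsets
  have hlend : (offs (p :: rest) 0).length = rest.length + 1 := by
    rw [length_offs]; rfl
  rw [wsum, hlend, Nat.add_sub_cancel]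
  apply Finset.sum_congr rfl
  intro t ht
  rw [Finset.mem_range] at ht
  have h1 : (offs (p :: rest) 0).getD (t + 1) 0
      = (p :: rest).getD (t + 1) 0 - ((t + 1 : Nat) : Int) :=
    offs_getD (p :: rest) (t + 1) (by simp; omega)
  have h2 : (offs (p :: rest) 0).getD t 0
      = (p :: rest).getD t 0 - (t : Int) :=
    offs_getD (p :: rest) t (by simp; omega)
  rw [h1, h2]
  have hmlen : m = ((rest.length + 1 : Nat) : Int) := by
    rw [hm, hps]; rfl
  rw [hmlen]
  push_cast
  have hmin : min ((1 : Int) + t) ((rest.length : Int) + 1 - (1 + t))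
      = min ((t : Int) + 1) ((rest.length : Int) + 1 - 1 - t) := by omega
  rw [hmin]
  ring

-- A's result, rewritten as the sum of |x - median| over the offsets
lemma A_eq (N : Int) (shelf : String)
    (hps_ne : posList (PySem.List.enumerate shelf.toList 0) ≠ []) :
    minimal_steps N shelf
      = ((offs (posList (PySem.List.enumerate shelf.toList 0)) 0).map
          (fun x => |x - (offs (posList (PySem.List.enumerate shelf.toList 0)) 0).getD
            ((offs (posList (PySem.List.enumerate shelf.toList 0)) 0).length / 2) 0|)).sum := by
  set ps := posList (PySem.List.enumerate shelf.toList 0) with hps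
  have hmi : ps.length / 2 < ps.length := by
    have := List.length_pos_of_ne_nil hps_ne; omega
  simp only [minimal_steps]
  rw [show (((PySem.List.enumerate shelf.toList 0).filter (fun p => p.2 == 'K')).map
      (fun p => p.1)) = ps from rfl]
  rw [PySem.List.foldl_add]
  rw [zero_add]
  conv_rhs => rw [length_offs, offs, List.map_map]
  congr 1
  apply List.map_congr_left
  intro q hq
  simp only [Function.comp]
  have hM : (offs ps 0).getD (ps.length / 2) 0
      = ps.getD (ps.length / 2) 0 - ((ps.length / 2 : Nat) : Int) :=
    offs_getD ps (ps.length / 2) hmi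
  rw [offs] at hM
  rw [hM, PySem.List.pyGetD_natCast]
  congr 1
  ring

-- ===== VERDICT (by name: the statement is the Claim_ definition above) =====
theorem minimal_steps_spec : Claim_equal_minimal_steps := by
  intro N shelf _ hpre
  unfold Spec_minimal_steps
  have hps_ne : posList (PySem.List.enumerate shelf.toList 0) ≠ [] := by
    have hmem : 'K' ∈ shelf.toList := hpre
    rcases List.mem_iff_getElem.mp hmem with ⟨j, hj, hjk⟩
    have h1 : ((0 + (j : Int)), shelf.toList[j]) ∈ PySem.List.enumerate shelf.toList 0 :=
      (PySem.List.mem_enumerate_iff _ _ _).mpr ⟨j, hj, rfl⟩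
    have h2 : ((0 + (j : Int)), shelf.toList[j])
        ∈ (PySem.List.enumerate shelf.toList 0).filter (fun p => p.2 == 'K') :=
      List.mem_filter.mpr ⟨h1, by simp [hjk]⟩
    exact List.ne_nil_of_mem (List.mem_map.mpr ⟨_, h2, rfl⟩)
  have hdl_ne : offs (posList (PySem.List.enumerate shelf.toList 0)) 0 ≠ [] := by
    intro h
    apply hps_ne
    have hlen := congrArg List.length h
    rw [length_offs] at hlen
    exact List.eq_nil_of_length_eq_zero hlen
  rw [A_eq N shelf hps_ne, B_eq N shelf hps_ne]
  rw [← dropTake_eq_wsum (offs (posList (PySem.List.enumerate shelf.toList 0)) 0).length _ le_rfl]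
  exact median_split _ _ le_rfl
    (offs_pairwise _ 0 (posList_pairwise shelf.toList)) hdl_ne
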